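-- pv_equiv track=rewrite | github.com/saulane/sorting_transformers | src/sorting_transformers/train/metrics.py | _stable_rank_indices
-- ===== SOURCE A (Python) =====
-- from typing import Dict, List, Tuple
--
-- def _stable_rank_indices(values: List[int], reference: List[int]) -> List[int]:
--     positions: Dict[int, List[int]] = {}
--     for idx, val in enumerate(reference):
--         positions.setdefault(val, []).append(idx)
--     ranks = []
--     for val in values:
--         if val not in positions or not positions[val]:
--             ranks.append(len(reference))
--         else:
--             ranks.append(positions[val].pop(0))
--     return ranks
-- ===== SOURCE B (Python) =====
-- from typing import Dict, List
--
--
-- def _stable_rank_indices(values: List[int], reference: List[int]) -> List[int]: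
--     ref_positions: Dict[int, List[int]] = {}
--     for idx, val in enumerate(reference):
--         ref_positions.setdefault(val, []).append(idx)
--     val_positions: Dict[int, List[int]] = {}
--     for pos, val in enumerate(values):
--         val_positions.setdefault(val, []).append(pos)
--     out = [len(reference)] * len(values)
--     for val, plist in val_positions.items():
--         for pos, ref_idx in zip(plist, ref_positions.get(val, [])):
--             out[pos] = ref_idx
--     return out
-- ===== Notes on version B (the rewrite author's own statement) =====
-- stated objective: alternative
-- what changed: A streams over values popping the next unused reference index per value from a single dict; B instead groups index positions of BOTH lists by value and does one zip/scatter pass writing ref indices into a prefilled output of len(reference) defaults.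
import Mathlib
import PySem

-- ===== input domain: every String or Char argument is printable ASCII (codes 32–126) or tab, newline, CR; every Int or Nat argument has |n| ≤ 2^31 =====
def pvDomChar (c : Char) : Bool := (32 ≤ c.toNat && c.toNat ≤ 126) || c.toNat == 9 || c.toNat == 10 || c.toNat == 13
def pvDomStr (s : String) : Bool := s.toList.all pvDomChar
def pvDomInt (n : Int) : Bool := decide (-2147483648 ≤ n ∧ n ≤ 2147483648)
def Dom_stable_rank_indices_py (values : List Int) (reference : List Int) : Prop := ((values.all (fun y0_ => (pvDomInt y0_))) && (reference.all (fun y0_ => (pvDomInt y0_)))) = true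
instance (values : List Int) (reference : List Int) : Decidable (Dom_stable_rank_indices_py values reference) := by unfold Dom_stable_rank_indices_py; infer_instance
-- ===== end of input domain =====

-- B replaces A's streaming pop(0) consumption by grouping BOTH sides (value -> its index list)
-- and a zip/scatter pass into a prefilled output list; proved to return the same list (alternative).


-- ===== PORT A =====
-- positions.setdefault(val, []).append(idx) is Dict.modify val [] (· ++ [idx]);
-- positions[val].pop(0) is the head/tail split in the some-(h :: t) branch.
def stable_rank_indices_py (values : List Int) (reference : List Int) : List Int :=
  let positions : PySem.Dict Int (List Int) :=
    (PySem.List.enumerate reference).foldl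
      (fun d p => d.modify p.2 [] (fun l => l ++ [p.1])) PySem.Dict.empty
  (values.foldl
    (fun (st : PySem.Dict Int (List Int) × List Int) v =>
      match st.1.get? v with
      | none => (st.1, st.2 ++ [(reference.length : Int)])
      | some [] => (st.1, st.2 ++ [(reference.length : Int)])
      | some (h :: t) => (st.1.insert v t, st.2 ++ [h]))
    (positions, [])).2

-- ===== PORT B =====
-- pos comes from enumerate so 0 ≤ pos < len(values): '.toNat' and List.set are
-- exact for Python's out[pos] = ref_idx here.
def stable_rank_indices_py_alt (values : List Int) (reference : List Int) : List Int :=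
  let ref_positions : PySem.Dict Int (List Int) :=
    (PySem.List.enumerate reference).foldl
      (fun d p => d.modify p.2 [] (fun l => l ++ [p.1])) PySem.Dict.empty
  let val_positions : PySem.Dict Int (List Int) :=
    (PySem.List.enumerate values).foldl
      (fun d p => d.modify p.2 [] (fun l => l ++ [p.1])) PySem.Dict.empty
  let out0 : List Int := List.replicate values.length (reference.length : Int)
  val_positions.items.foldl
    (fun out kv =>
      (kv.2.zip (ref_positions.getD kv.1 [])).foldl
        (fun o pr => o.set pr.1.toNat pr.2) out)
    out0

-- ===== PRECONDITION & SPEC =====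
def Spec_stable_rank_indices_py (values : List Int) (reference : List Int) (out : List Int) : Prop := out = stable_rank_indices_py_alt values reference
instance (values : List Int) (reference : List Int) (out : List Int) : Decidable (Spec_stable_rank_indices_py values reference out) := by unfold Spec_stable_rank_indices_py; infer_instance

-- ===== CLAIM (what is proved, stated in full; the proofs are below) =====
def Claim_equal_stable_rank_indices_py : Prop := ∀ (values : List Int) (reference : List Int), Dom_stable_rank_indices_py values reference → Spec_stable_rank_indices_py values reference (stable_rank_indices_py values reference)

-- ===== LEMMAS AND PROOFS =====

-- positions (as Nat indices) of v in vs, in order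
def posL : List Int → Int → List Nat
  | [], _ => []
  | x :: t, v => if x = v then 0 :: (posL t v).map (· + 1) else (posL t v).map (· + 1)

theorem mem_posL (vs : List Int) (v : Int) : ∀ (j : Nat),
    j ∈ posL vs v ↔ vs[j]? = some v := by
  induction vs with
  | nil => intro j; simp [posL]
  | cons x t ih =>
    intro j
    cases j with
    | zero =>
      by_cases hx : x = v
      · simp [posL, hx]
      · simp only [posL, if_neg hx, List.mem_map, List.getElem?_cons_zero]
        constructor
        · rintro ⟨a, _, h⟩; omega
        · intro h; exact absurd (Option.some_inj.mp h) hx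
    | succ j =>
      have h2 : j + 1 ∈ (posL t v).map (· + 1) ↔ j ∈ posL t v := by
        simp [List.mem_map]
      by_cases hx : x = v
      · simp only [posL, if_pos hx, List.mem_cons, List.getElem?_cons_succ]
        constructor
        · rintro (h | h)
          · omega
          · exact (ih j).mp (h2.mp h)
        · intro h; exact Or.inr (h2.mpr ((ih j).mpr h))
      · simp only [posL, if_neg hx, List.getElem?_cons_succ]
        rw [h2, ih j]

theorem pairwise_posL (vs : List Int) (v : Int) : (posL vs v).Pairwise (· < ·) := by
  induction vs with
  | nil => simp [posL]
  | cons x t ih =>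
    have hmap : ((posL t v).map (· + 1)).Pairwise (fun a b => a < b) :=
      List.Pairwise.map _ (fun a b h => by omega) ih
    by_cases hx : x = v
    · simp only [posL, if_pos hx]
      refine List.Pairwise.cons ?_ hmap
      intro b hb
      rcases List.mem_map.mp hb with ⟨a, _, rfl⟩; omega
    · simpa [posL, hx] using hmap

theorem nodup_posL (vs : List Int) (v : Int) : (posL vs v).Nodup :=
  (pairwise_posL vs v).nodup

theorem posL_getElem?_count (vs : List Int) (v : Int) : ∀ (i : Nat), vs[i]? = some v →
    (posL vs v)[(vs.take i).count v]? = some i := by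
  induction vs with
  | nil => intro i h; simp at h
  | cons x t ih =>
    intro i h
    cases i with
    | zero =>
      have hx : x = v := by simpa using h
      simp [posL, hx]
    | succ i =>
      have ht : t[i]? = some v := by simpa using h
      have ihh := ih i ht
      have hm : ((posL t v).map (· + 1))[(t.take i).count v]? = some (i + 1) := by
        rw [List.getElem?_map, ihh]; rfl
      by_cases hx : x = v
      · have hcnt : ((x :: t).take (i + 1)).count v = (t.take i).count v + 1 := by
          rw [List.take_succ_cons, List.count_cons]
          simp [hx]
        rw [hcnt]
        simp only [posL, if_pos hx, List.getElem?_cons_succ]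
        exact hm
      · have hcnt : ((x :: t).take (i + 1)).count v = (t.take i).count v := by
          rw [List.take_succ_cons, List.count_cons]
          simp [hx]
        rw [hcnt]
        simp only [posL, if_neg hx]
        exact hm

theorem posL_index_eq_count (vs : List Int) (v : Int) (i j : Nat)
    (hv : vs[i]? = some v) (hj : (posL vs v)[j]? = some i) :
    j = (vs.take i).count v := by
  have h1 := posL_getElem?_count vs v i hv
  have hjlt : j < (posL vs v).length := by
    by_contra hge
    rw [List.getElem?_eq_none (by omega)] at hj
    exact absurd hj (by simp)
  exact List.getElem?_inj hjlt (nodup_posL vs v) (hj.trans h1.symm)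

-- the grouping loop's enumerate/filter form equals posL shifted by the start
theorem enum_filter_posL (vs : List Int) (v : Int) : ∀ (s : Int),
    ((PySem.List.enumerate vs s).filter (fun p => p.2 == v)).map (fun p => p.1)
      = (posL vs v).map (fun j : Nat => s + (j : Int)) := by
  induction vs with
  | nil => intro s; simp [PySem.List.enumerate_nil, posL]
  | cons x t ih =>
    intro s
    rw [PySem.List.enumerate_cons]
    have hmm : ((posL t v).map (· + 1)).map (fun j : Nat => s + (j : Int))
        = (posL t v).map (fun j : Nat => (s + 1) + (j : Int)) := by
      rw [List.map_map]
      apply List.map_congr_left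
      intro a _
      simp only [Function.comp]
      push_cast
      ring
    by_cases hx : x = v
    · rw [List.filter_cons_of_pos (by simpa using hx)]
      simp only [posL, if_pos hx, List.map_cons]
      rw [ih (s + 1), hmm]
      simp
    · rw [List.filter_cons_of_neg (by simpa using hx)]
      simp only [posL, if_neg hx]
      rw [ih (s + 1), hmm]

def grp (vs : List Int) : PySem.Dict Int (List Int) :=
  (PySem.List.enumerate vs).foldl
    (fun d p => d.modify p.2 [] (fun l => l ++ [p.1])) PySem.Dict.empty

theorem grp_getD (vs : List Int) (v : Int) :
    (grp vs).getD v [] = (posL vs v).map (fun j : Nat => (j : Int)) := by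
  unfold grp
  have h0 : (PySem.List.enumerate vs 0).foldl
        (fun d p => d.modify p.2 [] (fun l => l ++ [p.1])) PySem.Dict.empty
      = ((PySem.List.enumerate vs 0).map Prod.swap).foldl
        (fun d q => d.modify q.1 [] (fun l => l ++ [q.2])) PySem.Dict.empty := by
    rw [List.foldl_map]; rfl
  rw [h0, PySem.Dict.getD_foldl_modify_append, PySem.Dict.getD_empty]
  have hf : (fun q : Int × Int => q.1 == v) ∘ Prod.swap = (fun p : Int × Int => p.2 == v) := by
    funext p; rfl
  rw [List.filter_map, hf, List.map_map]
  have : ((fun q : Int × Int => q.2) ∘ Prod.swap) = (fun p : Int × Int => p.1) := by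
    funext p; rfl
  rw [this, enum_filter_posL]
  simp

theorem grp_keys (vs : List Int) : (grp vs).keys = PySem.Set.ofList vs := by
  unfold grp
  rw [PySem.Dict.keys_foldl_modify_key (PySem.List.enumerate vs 0) (fun p => p.2) []
      (fun _ p => (fun l => l ++ [p.1]))]
  rw [PySem.Dict.keys_empty, PySem.List.map_snd_enumerate, PySem.Set.ofList_eq_foldl]
  rfl

theorem grp_keys_nodup (vs : List Int) : (grp vs).keys.Nodup := by
  rw [grp_keys]; exact PySem.Set.nodup_ofList vs

theorem grp_items (vs : List Int) :
    (grp vs).items = (PySem.Set.ofList vs).map (fun k => (k, (posL vs k).map (fun j : Nat => (j : Int)))) := by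
  rw [PySem.Dict.items_eq_map_keys (grp vs) (grp_keys_nodup vs) [], grp_keys]
  apply List.map_congr_left
  intro k _
  rw [grp_getD]

theorem mem_iff_posL_ne_nil (vs : List Int) (v : Int) : v ∈ vs ↔ posL vs v ≠ [] := by
  constructor
  · intro hv hnil
    rcases List.mem_iff_getElem?.mp hv with ⟨i, hi⟩
    have := (mem_posL vs v i).mpr hi
    rw [hnil] at this
    simp at this
  · intro hne
    rcases List.exists_mem_of_ne_nil _ hne with ⟨j, hj⟩
    exact List.mem_of_getElem? ((mem_posL vs v j).mp hj)

theorem grp_get? (vs : List Int) (v : Int) :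
    (grp vs).get? v = if posL vs v = [] then none
      else some ((posL vs v).map (fun j : Nat => (j : Int))) := by
  by_cases hv : posL vs v = []
  · rw [if_pos hv]
    rw [PySem.Dict.get?_eq_none_iff_contains]
    have : ¬ (grp vs).contains v = true := by
      rw [PySem.Dict.contains_iff_mem_keys, grp_keys, PySem.Set.mem_ofList]
      intro hm
      exact absurd hv ((mem_iff_posL_ne_nil vs v).mp hm)
    simpa using this
  · rw [if_neg hv]
    have hc : (grp vs).contains v = true := by
      rw [PySem.Dict.contains_iff_mem_keys, grp_keys, PySem.Set.mem_ofList]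
      exact (mem_iff_posL_ne_nil vs v).mpr hv
    have hs : ((grp vs).get? v).isSome := by
      rw [← PySem.Dict.contains_eq_isSome_get?]; exact hc
    rcases Option.isSome_iff_exists.mp hs with ⟨w, hw⟩
    have := PySem.Dict.getD_of_get?_eq_some (grp vs) ([] : List Int) hw
    rw [grp_getD] at this
    rw [hw, this]

-- A's values loop, specified with a running per-value consumption count
def specC (reference : List Int) : (Int → Nat) → List Int → List Int
  | _, [] => []
  | c, v :: t =>
      ((posL reference v).map (fun j : Nat => (j : Int))).getD (c v) (reference.length : Int)
        :: specC reference (fun w => if w = v then c v + 1 else c w) t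

theorem specC_length (reference : List Int) (vs : List Int) : ∀ (c : Int → Nat),
    (specC reference c vs).length = vs.length := by
  induction vs with
  | nil => intro c; simp [specC]
  | cons v t ih => intro c; simp [specC, ih]

theorem specC_getElem? (reference : List Int) (vs : List Int) :
    ∀ (c : Int → Nat) (i : Nat) (v : Int), vs[i]? = some v →
    (specC reference c vs)[i]? =
      some (((posL reference v).map (fun j : Nat => (j : Int))).getD
        (c v + (vs.take i).count v) (reference.length : Int)) := by
  induction vs with
  | nil => intro c i v h; simp at h
  | cons x t ih =>
    intro c i v h
    cases i with
    | zero =>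
      have hx : x = v := by simpa using h
      subst hx
      simp [specC]
    | succ i =>
      have ht : t[i]? = some v := by simpa using h
      have hcnt : (((x :: t)).take (i + 1)).count v
          = (t.take i).count v + (if v = x then 1 else 0) := by
        rw [List.take_succ_cons, List.count_cons]
        by_cases hv : v = x
        · subst hv; simp
        · have hbx : (x == v) = false := by
            rw [beq_eq_false_iff_ne]; exact fun hh => hv hh.symm
          simp [hbx, hv]
      simp only [specC, List.getElem?_cons_succ]
      rw [ih _ i v ht]
      have harg : (fun w => if w = x then c x + 1 else c w) v + (t.take i).count v
          = c v + (((x :: t).take (i + 1)).count v) := by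
        rw [hcnt]
        beta_reduce
        by_cases hv : v = x
        · subst hv
          rw [if_pos rfl, if_pos rfl]
          omega
        · rw [if_neg hv, if_neg hv]
          omega
      rw [harg]

theorem A_loop (reference : List Int) (vs : List Int) :
    ∀ (d : PySem.Dict Int (List Int)) (acc : List Int) (c : Int → Nat),
    (∀ v, d.get? v = if posL reference v = [] then none
        else some (((posL reference v).map (fun j : Nat => (j : Int))).drop (c v))) →
    (vs.foldl
      (fun (st : PySem.Dict Int (List Int) × List Int) v =>
        match st.1.get? v with
        | none => (st.1, st.2 ++ [(reference.length : Int)])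
        | some [] => (st.1, st.2 ++ [(reference.length : Int)])
        | some (h :: t) => (st.1.insert v t, st.2 ++ [h]))
      (d, acc)).2 = acc ++ specC reference c vs := by
  induction vs with
  | nil => intro d acc c _; simp [specC]
  | cons v t ih =>
    intro d acc c hinv
    rw [List.foldl_cons]
    by_cases hp : posL reference v = []
    · have hget : d.get? v = none := by rw [hinv v, if_pos hp]
      simp only [hget]
      rw [ih d (acc ++ [(reference.length : Int)]) (fun w => if w = v then c v + 1 else c w)
        (by
          intro w
          beta_reduce
          rw [hinv w]
          by_cases hw : w = v
          · subst hw; simp [hp]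
          · simp only [if_neg hw])]
      simp only [specC]
      rw [List.getD_eq_default _ _ (by rw [List.length_map, hp]; simp)]
      simp
    · have hget : d.get? v
          = some (((posL reference v).map (fun j : Nat => (j : Int))).drop (c v)) := by
        rw [hinv v, if_neg hp]
      by_cases hlt : c v < (posL reference v).length
      · have hlt' : c v < ((posL reference v).map (fun j : Nat => (j : Int))).length := by
          rw [List.length_map]; exact hlt
        have hdrop := List.drop_eq_getElem_cons hlt'
        rw [hdrop] at hget
        simp only [hget]
        rw [ih (d.insert v (((posL reference v).map (fun j : Nat => (j : Int))).drop (c v + 1)))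
            (acc ++ [((posL reference v).map (fun j : Nat => (j : Int)))[c v]'hlt'])
            (fun w => if w = v then c v + 1 else c w)
            (by
              intro w
              beta_reduce
              rw [PySem.Dict.get?_insert]
              by_cases hw : w = v
              · subst hw
                simp [hp]
              · simp only [if_neg hw]
                exact hinv w)]
        simp only [specC]
        rw [List.getD_eq_getElem _ _ hlt']
        simp
      · have hdrop : ((posL reference v).map (fun j : Nat => (j : Int))).drop (c v) = [] :=
          List.drop_eq_nil_of_le (by rw [List.length_map]; omega)
        rw [hdrop] at hget
        simp only [hget]
        rw [ih d (acc ++ [(reference.length : Int)]) (fun w => if w = v then c v + 1 else c w)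
          (by
            intro w
            beta_reduce
            rw [hinv w]
            by_cases hw : w = v
            · subst hw
              have hdrop2 : ((posL reference w).map (fun j : Nat => (j : Int))).drop (c w + 1) = [] :=
                List.drop_eq_nil_of_le (by rw [List.length_map]; omega)
              simp [hp, hdrop, hdrop2]
            · simp only [if_neg hw])]
        simp only [specC]
        rw [List.getD_eq_default _ _ (by rw [List.length_map]; omega)]
        simp

theorem A_eq_specC (values reference : List Int) :
    stable_rank_indices_py values reference = specC reference (fun _ => 0) values := by
  show (values.foldl
      (fun (st : PySem.Dict Int (List Int) × List Int) v =>
        match st.1.get? v with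
        | none => (st.1, st.2 ++ [(reference.length : Int)])
        | some [] => (st.1, st.2 ++ [(reference.length : Int)])
        | some (h :: t) => (st.1.insert v t, st.2 ++ [h]))
      (grp reference, [])).2 = specC reference (fun _ => 0) values
  rw [A_loop reference values (grp reference) [] (fun _ => 0) ?_]
  · simp
  · intro v
    rw [grp_get?, List.drop_zero]

-- ===== B side =====

theorem foldl_foldl_flatMap {α β : Type} (g : List Int → β → List Int) (W : α → List β)
    (l : List α) : ∀ (o : List Int),
    l.foldl (fun o a => (W a).foldl g o) o = (l.flatMap W).foldl g o := by
  induction l with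
  | nil => intro o; simp
  | cons a t ih => intro o; simp [List.flatMap_cons, List.foldl_append, ih]

theorem writes_getElem? (Wn : List (Nat × Int)) : ∀ (o : List Int) (i : Nat),
    (Wn.map (fun q => q.1)).Nodup →
    (Wn.foldl (fun o q => o.set q.1 q.2) o)[i]? =
      match Wn.find? (fun q => q.1 == i) with
      | some q => if i < o.length then some q.2 else none
      | none => o[i]? := by
  induction Wn with
  | nil => intro o i _; simp
  | cons q W ih =>
    intro o i hnd
    rw [List.map_cons, List.nodup_cons] at hnd
    obtain ⟨hq1, hndW⟩ := hnd
    rw [List.foldl_cons]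
    by_cases hqi : q.1 = i
    · have hfind : List.find? (fun q => q.1 == i) (q :: W) = some q := by
        rw [List.find?_cons_of_pos]; simpa using hqi
      rw [hfind]
      rw [ih (o.set q.1 q.2) i hndW]
      have hWnone : W.find? (fun q => q.1 == i) = none := by
        rw [List.find?_eq_none]
        intro x hx hbx
        apply hq1
        have hx1 : x.1 = i := by simpa using hbx
        have hmm : x.1 ∈ W.map (fun q => q.1) := List.mem_map.mpr ⟨x, hx, rfl⟩
        rw [hx1, ← hqi] at hmm
        exact hmm
      rw [hWnone]
      subst hqi
      by_cases hlen : q.1 < o.length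
      · show (o.set q.1 q.2)[q.1]? = if q.1 < o.length then some q.2 else none
        rw [if_pos hlen, List.getElem?_set_self hlen]
      · show (o.set q.1 q.2)[q.1]? = if q.1 < o.length then some q.2 else none
        rw [if_neg hlen, List.getElem?_eq_none]
        rw [List.length_set]; omega
    · have hfind : List.find? (fun q => q.1 == i) (q :: W) = W.find? (fun q => q.1 == i) := by
        rw [List.find?_cons_of_neg]; simpa using hqi
      rw [hfind, ih (o.set q.1 q.2) i hndW, List.getElem?_set_ne hqi]
      cases hf : W.find? (fun q => q.1 == i) with
      | none => rfl
      | some p => simp [List.length_set]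

theorem nodup_flatMap_of {α β : Type} (l : List α) (f : α → List β)
    (hl : l.Nodup)
    (hf : ∀ a ∈ l, (f a).Nodup)
    (hdisj : ∀ a ∈ l, ∀ b ∈ l, a ≠ b → ∀ x ∈ f a, x ∉ f b) :
    (l.flatMap f).Nodup := by
  induction l with
  | nil => simp
  | cons a t ih =>
    rw [List.nodup_cons] at hl
    rw [List.flatMap_cons, List.nodup_append]
    refine ⟨hf a (by simp), ih hl.2 (fun b hb => hf b (by simp [hb]))
      (fun b hb b' hb' hne => hdisj b (by simp [hb]) b' (by simp [hb']) hne), ?_⟩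
    intro x hx y hy hxy
    subst hxy
    rcases List.mem_flatMap.mp hy with ⟨b, hb, hxb⟩
    have hab : a ≠ b := fun h => hl.1 (h ▸ hb)
    exact hdisj a (by simp) b (by simp [hb]) hab x hx hxb

theorem zip_getElem? {α β : Type} (l : List α) : ∀ (m : List β) (i : Nat),
    (l.zip m)[i]? = l[i]?.bind (fun a => m[i]?.map (fun b => (a, b))) := by
  induction l with
  | nil => intro m i; simp
  | cons x t ih =>
    intro m i
    cases m with
    | nil => simp
    | cons y m =>
      cases i with
      | zero => simp
      | succ i => simp [ih m i]

-- the full write list of B's scatter pass, over Nat positions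
def Wr (values reference : List Int) : List (Nat × Nat) :=
  (PySem.Set.ofList values).flatMap (fun k => (posL values k).zip (posL reference k))

theorem Wr_fst_nodup (values reference : List Int) :
    ((Wr values reference).map (fun q => q.1)).Nodup := by
  unfold Wr
  rw [List.map_flatMap]
  apply nodup_flatMap_of _ _ (PySem.Set.nodup_ofList values)
  · intro k _
    have hsub : (((posL values k).zip (posL reference k)).map (fun q => q.1)).Sublist (posL values k) := by
      generalize posL reference k = m
      induction posL values k generalizing m with
      | nil => simp
      | cons x t ih =>
        cases m with
        | nil => simp
        | cons y m => simpa using List.Sublist.cons₂ x (ih m)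
    exact (nodup_posL values k).sublist hsub
  · intro a _ b _ hab x hxa hxb
    rcases List.mem_map.mp hxa with ⟨qa, hqa, rfl⟩
    rcases List.mem_map.mp hxb with ⟨qb, hqb, hqq⟩
    have h1 : qa.1 ∈ posL values a := ((List.of_mem_zip (a := qa.1) (b := qa.2)) hqa).1
    have h2 : qb.1 ∈ posL values b := ((List.of_mem_zip (a := qb.1) (b := qb.2)) hqb).1
    rw [hqq] at h2
    have ha := (mem_posL values a qa.1).mp h1
    have hb := (mem_posL values b qa.1).mp h2
    rw [ha] at hb
    exact hab (Option.some_inj.mp hb)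

theorem Wr_find? (values reference : List Int) (i : Nat) (v : Int)
    (h : values[i]? = some v) :
    (Wr values reference).find? (fun q => q.1 == i) =
      ((posL reference v)[((values.take i).count v)]?).map (fun r => (i, r)) := by
  set k := (values.take i).count v with hk
  have hvk := posL_getElem?_count values v i h
  by_cases hlt : k < (posL reference v).length
  · -- the pair (i, posL reference v [k]) is in Wr; find it
    obtain ⟨r, hr⟩ : ∃ r, (posL reference v)[k]? = some r :=
      ⟨(posL reference v)[k]'hlt, List.getElem?_eq_getElem hlt⟩
    have hmemzip : (i, r) ∈ (posL values v).zip (posL reference v) := by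
      apply List.mem_iff_getElem?.mpr ⟨k, ?_⟩
      rw [zip_getElem?, hvk, hr]; rfl
    have hmem : (i, r) ∈ Wr values reference := by
      unfold Wr
      exact List.mem_flatMap.mpr ⟨v, (PySem.Set.mem_ofList values v).mpr
        (List.mem_of_getElem? h), hmemzip⟩
    rw [hr]
    -- find? returns (i, r) since firsts are nodup and (i, r) has first i
    have hnd := Wr_fst_nodup values reference
    generalize hW : Wr values reference = W at hmem hnd
    clear hW hmemzip hvk
    induction W with
    | nil => simp at hmem
    | cons q t ih =>
      rw [List.map_cons, List.nodup_cons] at hnd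
      rcases List.mem_cons.mp hmem with heq | hmem'
      · rw [← heq]
        rw [List.find?_cons_of_pos (by simp)]
        rfl
      · have hq1 : q.1 ≠ i := by
          intro hq1
          exact hnd.1 (hq1 ▸ List.mem_map.mpr ⟨(i, r), hmem', rfl⟩)
        rw [List.find?_cons_of_neg (by simpa using hq1)]
        exact ih hmem' hnd.2
  · -- no write lands on i
    rw [List.getElem?_eq_none (by omega)]
    show (Wr values reference).find? (fun q => q.1 == i) = none
    rw [List.find?_eq_none]
    intro q hq hbq
    have hqi : q.1 = i := by simpa using hbq
    unfold Wr at hq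
    rcases List.mem_flatMap.mp hq with ⟨w, _, hqzip⟩
    have hq1w : q.1 ∈ posL values w := (List.of_mem_zip (a := q.1) (b := q.2) (by
      have : q = (q.1, q.2) := rfl
      rw [this] at hqzip; exact hqzip)).1
    have hvw : values[q.1]? = some w := (mem_posL values w q.1).mp hq1w
    rw [hqi, h] at hvw
    have hwv : w = v := (Option.some_inj.mp hvw).symm
    rw [hwv] at hqzip
    -- q is at some index j in the zip, so (posL values v)[j]? = some i with j < len (posL reference v)
    rcases List.mem_iff_getElem?.mp hqzip with ⟨j, hj⟩
    rw [zip_getElem?] at hj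
    rcases Option.bind_eq_some_iff.mp hj with ⟨a, ha, hmap⟩
    rcases Option.map_eq_some_iff.mp hmap with ⟨b, hb, hab⟩
    have haq : a = q.1 := by rw [← hab]
    rw [haq, hqi] at ha
    have hjk : j = k := posL_index_eq_count values v i j h ha
    have hjlt : j < (posL reference v).length := by
      by_contra hge
      rw [List.getElem?_eq_none (by omega)] at hb
      simp at hb
    omega

theorem B_spec (values reference : List Int) :
    stable_rank_indices_py_alt values reference = specC reference (fun _ => 0) values := by
  show ((grp values).items.foldl
      (fun out kv =>
        (kv.2.zip ((grp reference).getD kv.1 [])).foldl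
          (fun o pr => o.set pr.1.toNat pr.2) out)
      (List.replicate values.length (reference.length : Int)))
      = specC reference (fun _ => 0) values
  rw [foldl_foldl_flatMap (fun o pr => o.set pr.1.toNat pr.2)
      (fun kv : Int × List Int => kv.2.zip ((grp reference).getD kv.1 [])), grp_items]
  rw [List.flatMap_map]
  simp only [grp_getD, List.zip_map]
  have hflat : ((PySem.Set.ofList values).flatMap
        (fun k => ((posL values k).zip (posL reference k)).map
          (Prod.map (fun j : Nat => (j : Int)) (fun j : Nat => (j : Int)))))
      = (Wr values reference).map (Prod.map (fun j : Nat => (j : Int)) (fun j : Nat => (j : Int))) := by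
    rw [Wr, List.map_flatMap]
  rw [hflat, List.foldl_map]
  have hsetform : (fun (o : List Int) (q : Nat × Nat) =>
        o.set ((Prod.map (fun j : Nat => (j : Int)) (fun j : Nat => (j : Int)) q).1).toNat
          (Prod.map (fun j : Nat => (j : Int)) (fun j : Nat => (j : Int)) q).2)
      = (fun (o : List Int) (q : Nat × Nat) => o.set q.1 ((q.2 : Int))) := by
    funext o q
    simp [Prod.map]
  rw [show (fun (x : List Int) (y : Nat × Nat) =>
        x.set ((Prod.map (fun j : Nat => (j : Int)) (fun j : Nat => (j : Int)) y).1).toNat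
          (Prod.map (fun j : Nat => (j : Int)) (fun j : Nat => (j : Int)) y).2)
      = (fun (o : List Int) (q : Nat × Nat) => o.set q.1 ((q.2 : Int))) from hsetform]
  -- switch to the (Nat × Int) writes form
  have hfold2 : (Wr values reference).foldl (fun (o : List Int) (q : Nat × Nat) => o.set q.1 ((q.2 : Int)))
        (List.replicate values.length (reference.length : Int))
      = ((Wr values reference).map (fun q => (q.1, (q.2 : Int)))).foldl
        (fun (o : List Int) (q : Nat × Int) => o.set q.1 q.2)
        (List.replicate values.length (reference.length : Int)) := by
    rw [List.foldl_map]
  rw [hfold2]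
  set Wn : List (Nat × Int) := (Wr values reference).map (fun q => (q.1, (q.2 : Int))) with hWn
  have hWnd : (Wn.map (fun q => q.1)).Nodup := by
    rw [hWn, List.map_map]
    exact Wr_fst_nodup values reference
  apply List.ext_getElem?
  intro i
  rw [writes_getElem? Wn _ i hWnd]
  by_cases hi : i < values.length
  · obtain ⟨v, hv⟩ : ∃ v, values[i]? = some v :=
      ⟨values[i]'hi, List.getElem?_eq_getElem hi⟩
    have hfindW : Wn.find? (fun q => q.1 == i)
        = (((posL reference v)[((values.take i).count v)]?).map (fun r => (i, (r : Int)))) := by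
      rw [hWn]
      rw [List.find?_map]
      have hpred : ((fun q : Nat × Int => q.1 == i) ∘ (fun q : Nat × Nat => (q.1, (q.2 : Int))))
          = (fun q : Nat × Nat => q.1 == i) := by
        funext q; rfl
      rw [hpred, Wr_find? values reference i v hv]
      cases ((posL reference v)[((values.take i).count v)]?) <;> rfl
    rw [hfindW]
    rw [specC_getElem? reference values (fun _ => 0) i v hv]
    have hlen : i < (List.replicate values.length (reference.length : Int)).length := by
      simpa using hi
    rw [List.getD_eq_getElem?_getD, List.getElem?_map]
    simp only [Nat.zero_add]
    cases hcell : ((posL reference v)[((values.take i).count v)]?) with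
    | none =>
      simp only [Option.map_none, List.getElem?_replicate, if_pos hi]
      rfl
    | some r =>
      simp only [Option.map_some, if_pos hlen]
      rfl
  · -- out of range on both sides
    have h1 : Wn.find? (fun q => q.1 == i) = none := by
      rw [List.find?_eq_none]
      intro q hq hbq
      have hqi : q.1 = i := by simpa using hbq
      rw [hWn] at hq
      rcases List.mem_map.mp hq with ⟨qn, hqn, rfl⟩
      unfold Wr at hqn
      rcases List.mem_flatMap.mp hqn with ⟨w, _, hz⟩
      have : qn.1 ∈ posL values w := (List.of_mem_zip (a := qn.1) (b := qn.2) (by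
        have : qn = (qn.1, qn.2) := rfl
        rw [this] at hz; exact hz)).1
      have hvw := (mem_posL values w qn.1).mp this
      have : qn.1 < values.length := by
        by_contra hge
        rw [List.getElem?_eq_none (by omega)] at hvw
        simp at hvw
      simp only at hqi
      omega
    rw [h1, List.getElem?_replicate, if_neg hi, List.getElem?_eq_none]
    rw [specC_length]
    omega

-- ===== VERDICT (by name: the statement is the Claim_ definition above) =====
theorem stable_rank_indices_py_spec : Claim_equal_stable_rank_indices_py := by
  intro values reference _
  unfold Spec_stable_rank_indices_py
  rw [A_eq_specC, B_spec]
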